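-- pv_equiv track=rewrite | github.com/tim-omahony/job_algos | circle/q1.py | solution
-- ===== SOURCE A (Python) =====
-- def solution(a, l, r):
--   boolean_arr = [False] * len(a)
--   for i in range(len(a)):
--     for x in range(r):
--       if l <= x and x <= r:
--         if a[i] == (i + 1) * x:
--           boolean_arr[i] = True
--
--   return boolean_arr
-- ===== SOURCE B (Python) =====
-- def solution(a, l, r):
--   lo = max(l, 0)
--   out = []
--   for i, v in enumerate(a):
--     q = v // (i + 1)
--     rem = v % (i + 1)
--     out.append(rem == 0 and lo <= q <= r - 1)
--   return out
-- ===== Notes on version B (the rewrite author's own statement) =====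
-- stated objective: faster
-- what changed: B replaces A's inner scan of every x in range(r) by a single divisibility test per element (a[i] % (i+1) == 0 and max(l,0) <= a[i]//(i+1) <= r-1), making one pass over the list.
import Mathlib
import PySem

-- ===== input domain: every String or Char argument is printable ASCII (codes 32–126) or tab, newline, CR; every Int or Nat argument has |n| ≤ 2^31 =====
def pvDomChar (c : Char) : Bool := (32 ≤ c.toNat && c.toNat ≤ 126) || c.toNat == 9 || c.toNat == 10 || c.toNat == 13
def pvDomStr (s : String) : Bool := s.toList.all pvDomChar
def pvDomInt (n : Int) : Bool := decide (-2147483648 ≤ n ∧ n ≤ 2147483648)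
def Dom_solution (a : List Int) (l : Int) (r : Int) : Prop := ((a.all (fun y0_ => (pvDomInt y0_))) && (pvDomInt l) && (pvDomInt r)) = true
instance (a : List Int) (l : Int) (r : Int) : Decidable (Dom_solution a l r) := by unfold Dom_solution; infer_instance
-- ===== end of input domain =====

-- B replaces A's inner scan over range(r) by a direct divisibility test (a[i] % (i+1) == 0
-- and max(l,0) <= a[i]//(i+1) <= r-1), one pass over the list: asymptotically faster.


-- ===== PORT A =====
-- literal port: boolean_arr = [False]*len(a); nested loops over range(len(a)) and range(r);
-- a[i] is in range for every i of the outer loop, so pyGetD's default 0 is never consulted.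
def solution (a : List Int) (l : Int) (r : Int) : List Bool :=
  let boolean_arr := List.replicate a.length false
  (PySem.List.pyRange 0 (a.length : Int) 1).foldl (fun arr i =>
    (PySem.List.pyRange 0 r 1).foldl (fun arr x =>
      if l ≤ x ∧ x ≤ r then
        (if PySem.List.pyGetD a i 0 = (i + 1) * x then arr.set i.toNat true else arr)
      else arr) arr) boolean_arr

-- ===== PORT B =====
def solution_alt (a : List Int) (l : Int) (r : Int) : List Bool :=
  let lo := max l 0
  (PySem.List.enumerate a 0).map (fun p =>
    let q := PySem.Int.floordiv p.2 (p.1 + 1)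
    let rem := PySem.Int.mod p.2 (p.1 + 1)
    decide (rem = 0 ∧ lo ≤ q ∧ q ≤ r - 1))

-- ===== PRECONDITION & SPEC =====
def Spec_solution (a : List Int) (l : Int) (r : Int) (out : List Bool) : Prop := out = solution_alt a l r
instance (a : List Int) (l : Int) (r : Int) (out : List Bool) : Decidable (Spec_solution a l r out) := by unfold Spec_solution; infer_instance

-- ===== CLAIM (what is proved, stated in full; the proofs are below) =====
def Claim_equal_solution : Prop := ∀ (a : List Int) (l : Int) (r : Int), Dom_solution a l r → Spec_solution a l r (solution a l r)

-- ===== LEMMAS AND PROOFS =====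

-- the inner loop over x either sets index j to true (if some x passes both tests) or leaves arr alone
theorem inner_fold (xs : List Int) (c1 c2 : Int → Prop) [DecidablePred c1] [DecidablePred c2]
    (j : Nat) (arr : List Bool) :
    xs.foldl (fun arr x => if c1 x then (if c2 x then arr.set j true else arr) else arr) arr
      = if xs.any (fun x => decide (c1 x) && decide (c2 x)) then arr.set j true else arr := by
  induction xs generalizing arr with
  | nil => simp
  | cons y ys ih =>
    simp only [List.foldl_cons, List.any_cons]
    by_cases h1 : c1 y <;> by_cases h2 : c2 y <;>
      simp only [ih, h1, h2, decide_true, decide_false, if_false, Bool.true_and,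
        Bool.false_and, Bool.true_or, Bool.false_or, if_pos] <;>
      split <;> simp [List.set_set]

-- the outer loop fills the first n entries with Q, leaving the remaining replicate untouched
theorem outer_fold (Q : Nat → Bool) (n m : Nat) (h : n ≤ m) :
    (List.range n).foldl (fun arr k => if Q k then arr.set k true else arr) (List.replicate m false)
      = (List.range n).map Q ++ List.replicate (m - n) false := by
  induction n with
  | zero => simp
  | succ n ih =>
    have hn : n ≤ m := Nat.le_of_succ_le h
    rw [List.range_succ, List.foldl_append, ih hn]
    have hlen : ((List.range n).map Q).length = n := by simp
    have hrep : List.replicate (m - n) false = false :: List.replicate (m - (n+1)) false := by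
      have : m - n = (m - (n+1)) + 1 := by omega
      rw [this, List.replicate_succ]
    simp only [List.foldl_cons, List.foldl_nil, List.map_append, List.map_cons,
      List.map_nil]
    by_cases hq : Q n = true
    · rw [hq, if_pos rfl, List.set_append_right _ _ (by omega), hlen, hrep]
      simp
    · rw [Bool.not_eq_true] at hq
      rw [hq, if_neg (by simp), hrep]
      simp

-- pointwise arithmetic: scanning x ∈ [0, r) for v = k*x ∧ l ≤ x ∧ x ≤ r is the divisibility test
theorem point (v l r k : Int) (hk : 0 < k) :
    ((PySem.List.pyRange 0 r 1).any (fun x => decide (l ≤ x ∧ x ≤ r) && decide (v = k * x)))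
      = decide (PySem.Int.mod v k = 0 ∧ max l 0 ≤ PySem.Int.floordiv v k ∧ PySem.Int.floordiv v k ≤ r - 1) := by
  have hne : k ≠ 0 := ne_of_gt hk
  rw [← Bool.coe_iff_coe]
  simp only [List.any_eq_true, PySem.List.mem_pyRange_one, Bool.and_eq_true, decide_eq_true_eq]
  constructor
  · rintro ⟨x, ⟨hx0, hxr⟩, ⟨hlx, hxr'⟩, hv⟩
    have hq : PySem.Int.floordiv v k = x := by
      rw [PySem.Int.floordiv_eq_iff_of_pos hk, hv]; constructor <;> nlinarith
    have hm : PySem.Int.mod v k = 0 := by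
      rw [PySem.Int.mod_eq_zero_iff_dvd]; exact ⟨x, hv⟩
    exact ⟨hm, by rw [hq]; exact max_le hlx hx0, by omega⟩
  · rintro ⟨hmod, hlo, hhi⟩
    set q := PySem.Int.floordiv v k with hq
    have h := PySem.Int.floordiv_mul_add_mod v k
    rw [← hq, hmod, add_zero] at h
    have hv : v = k * q := by rw [← h]; ring
    have h0 : (0:Int) ≤ q := le_trans (le_max_right l 0) hlo
    have hl : l ≤ q := le_trans (le_max_left l 0) hlo
    exact ⟨q, ⟨h0, by omega⟩, ⟨hl, by omega⟩, hv⟩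

-- A's result, characterised: entry k records whether some x in [0,r) with l ≤ x satisfies a[k] = (k+1)*x
theorem solutionA_eq (a : List Int) (l : Int) (r : Int) :
    solution a l r = (List.range a.length).map (fun (k : Nat) =>
      (PySem.List.pyRange 0 r 1).any (fun x =>
        decide (l ≤ x ∧ x ≤ r) && decide (PySem.List.pyGetD a (k : Int) 0 = ((k : Int) + 1) * x))) := by
  unfold solution
  rw [PySem.List.pyRange_zero_nat, List.foldl_map]
  simp only [inner_fold, Int.toNat_natCast]
  rw [outer_fold _ a.length a.length le_rfl]
  simp only [Nat.sub_self, List.replicate_zero, List.append_nil]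

theorem solution_eq_alt (a : List Int) (l : Int) (r : Int) :
    solution a l r = solution_alt a l r := by
  rw [solutionA_eq]
  unfold solution_alt
  apply List.ext_getElem
  · simp [PySem.List.length_enumerate]
  · intro k h1 h2
    simp only [List.getElem_map, List.getElem_range, PySem.List.getElem_enumerate, zero_add]
    rw [point _ l r _ (by omega)]
    have hk : k < a.length := by simpa using h1
    simp [PySem.List.pyGetD_natCast, List.getElem?_eq_getElem hk]

-- ===== VERDICT (by name: the statement is the Claim_ definition above) =====
theorem solution_spec : Claim_equal_solution := by
  intro a l r _
  unfold Spec_solution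
  exact solution_eq_alt a l r
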